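-- pv_equiv track=rewrite | github.com/Bill9125/CATSRecording | EasyMocap/scripts/preprocess/file_process.py | find_common_img
-- ===== SOURCE A (Python) =====
-- def find_common_img(images):
--     temp_dict = {}
--     for key, values in images.items():
--         for value in values:
--             if value not in temp_dict:
--                 temp_dict[value] = 0
--             temp_dict[value] += 1
--     common_img = [value for value, count in temp_dict.items() if count > 1]
--     return common_img
-- ===== SOURCE B (Python) =====
-- def find_common_img(images):
--     seen = set()
--     duplicates = set()
--     for values in images.values():
--         for value in values:
--             if value in seen:
--                 duplicates.add(value)
--             else:
--                 seen.add(value)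
--     common_img = []
--     emitted = set()
--     for values in images.values():
--         for value in values:
--             if value in duplicates and value not in emitted:
--                 common_img.append(value)
--                 emitted.add(value)
--     return common_img
-- ===== Notes on version B (the rewrite author's own statement) =====
-- stated objective: alternative
-- what changed: Replaces the occurrence-count dict and count>1 filter by two passes over the values maintaining seen/duplicates membership sets, then an ordered emit pass with an emitted set that restores first-occurrence order.
import Mathlib
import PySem

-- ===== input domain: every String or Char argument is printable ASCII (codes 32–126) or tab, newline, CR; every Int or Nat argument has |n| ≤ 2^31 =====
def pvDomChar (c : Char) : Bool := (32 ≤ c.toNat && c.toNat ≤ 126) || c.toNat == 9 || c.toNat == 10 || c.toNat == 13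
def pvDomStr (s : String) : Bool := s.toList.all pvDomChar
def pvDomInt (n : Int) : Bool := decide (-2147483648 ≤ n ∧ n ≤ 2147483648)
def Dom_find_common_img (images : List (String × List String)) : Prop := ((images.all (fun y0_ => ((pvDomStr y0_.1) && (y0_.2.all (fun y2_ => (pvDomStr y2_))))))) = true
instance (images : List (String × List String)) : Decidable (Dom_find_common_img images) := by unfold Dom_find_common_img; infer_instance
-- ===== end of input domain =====

-- B replaces A's occurrence-count dict and count>1 filter by two passes with seen/duplicates
-- membership sets plus an ordered emit pass (objective: alternative decomposition, same cost).


-- ===== PORT A =====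
def find_common_img (images : List (String × List String)) : List String :=
  let temp_dict : PySem.Dict String Int :=
    images.foldl (fun d kv =>
      kv.2.foldl (fun d value =>
        let d1 := if ¬ d.contains value then d.insert value 0 else d
        d1.insert value (d1.getD value 0 + 1)) d) PySem.Dict.empty
  (temp_dict.items.filter (fun p => p.2 > 1)).map (fun p => p.1)

-- ===== PORT B =====
-- B-side helpers: the two loop bodies of Source B, as named step functions.
def step1 (sd : PySem.Set String × PySem.Set String) (v : String) :
    PySem.Set String × PySem.Set String :=
  if PySem.Set.contains sd.1 v then (sd.1, PySem.Set.add sd.2 v)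
  else (PySem.Set.add sd.1 v, sd.2)

def step2 (dup : PySem.Set String) (st : List String × PySem.Set String) (v : String) :
    List String × PySem.Set String :=
  if PySem.Set.contains dup v && !(PySem.Set.contains st.2 v)
  then (st.1 ++ [v], PySem.Set.add st.2 v) else st

def find_common_img_alt (images : List (String × List String)) : List String :=
  let sd := images.foldl (fun sd kv => kv.2.foldl step1 sd)
    (PySem.Set.empty, PySem.Set.empty)
  let res := images.foldl (fun st kv => kv.2.foldl (step2 sd.2) st)
    ([], PySem.Set.empty)
  res.1

-- ===== PRECONDITION & SPEC =====
def Spec_find_common_img (images : List (String × List String)) (out : List String) : Prop := out = find_common_img_alt images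
instance (images : List (String × List String)) (out : List String) : Decidable (Spec_find_common_img images out) := by unfold Spec_find_common_img; infer_instance

-- ===== CLAIM (what is proved, stated in full; the proofs are below) =====
def Claim_equal_find_common_img : Prop := ∀ (images : List (String × List String)), Dom_find_common_img images → Spec_find_common_img images (find_common_img images)

-- ===== LEMMAS AND PROOFS =====

lemma contains_iff_mem (s : PySem.Set String) (v : String) :
    PySem.Set.contains s v = true ↔ v ∈ s := by
  simp [PySem.Set.contains]

lemma add_eq_self {s : PySem.Set String} {x : String} (h : x ∈ s) :
    PySem.Set.add s x = s := by
  unfold PySem.Set.add; rw [if_pos ((contains_iff_mem s x).mpr h)]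

lemma add_eq_append {s : PySem.Set String} {x : String} (h : x ∉ s) :
    PySem.Set.add s x = s ++ [x] := by
  unfold PySem.Set.add
  rw [if_neg (fun hc => h ((contains_iff_mem s x).mp hc))]

-- A's per-value dict update is exactly the counter step.
lemma stepA_eq (d : PySem.Dict String Int) (v : String) :
    (let d1 := if ¬ d.contains v then d.insert v 0 else d
     d1.insert v (d1.getD v 0 + 1)) = d.insert v (d.getD v 0 + 1) := by
  by_cases h : d.contains v = true
  · dsimp only
    rw [if_neg (fun hc => hc h)]
  · have hn : d.get? v = none := by
      cases hg : d.get? v with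
      | none => rfl
      | some w =>
        exfalso
        exact h (by rw [PySem.Dict.contains_eq_isSome_get?, hg]; rfl)
    dsimp only
    rw [if_pos h, PySem.Dict.getD_insert_self, PySem.Dict.insert_insert_self]
    simp [PySem.Dict.getD, hn]

-- A's nested counting loop builds Counter(values).
lemma foldA_eq (vs : List String) :
    vs.foldl (fun d value =>
        let d1 := if ¬ d.contains value then d.insert value 0 else d
        d1.insert value (d1.getD value 0 + 1)) PySem.Dict.empty
      = PySem.Dict.counter vs := by
  rw [← PySem.Dict.foldl_insert_getD_add_one_eq_counter]
  apply PySem.List.foldl_congr_mem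
  intro acc x _
  exact stepA_eq acc x

-- A's result, characterised: first occurrences of the flattened values with count > 1.
lemma A_characterisation (images : List (String × List String)) :
    find_common_img images =
      (PySem.Set.ofList (images.flatMap (fun kv => kv.2))).filter
        (fun v => decide ((((images.flatMap (fun kv => kv.2)).count v : Int)) > 1)) := by
  have h0 : find_common_img images =
      ((images.foldl (fun d kv =>
          kv.2.foldl (fun d value =>
            let d1 := if ¬ d.contains value then d.insert value 0 else d
            d1.insert value (d1.getD value 0 + 1)) d)
          (PySem.Dict.empty : PySem.Dict String Int)).items.filter
        (fun p => decide (p.2 > 1))).map (fun p => p.1) := rfl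
  rw [h0, ← List.foldl_flatMap (f := fun kv : String × List String => kv.2),
    foldA_eq, PySem.Dict.items_counter, List.filter_map, List.map_map]
  simp [Function.comp_def]

-- Pass-1 invariant: the duplicates set holds exactly the values seen at least twice.
lemma pass1_invariant (vs : List String) (s d : PySem.Set String) (v : String) :
    (v ∈ (vs.foldl step1 (s, d)).1 ↔ v ∈ s ∨ v ∈ vs)
  ∧ (v ∈ (vs.foldl step1 (s, d)).2 ↔ v ∈ d ∨ (v ∈ s ∧ v ∈ vs) ∨ 2 ≤ vs.count v) := by
  induction vs generalizing s d with
  | nil => simp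
  | cons x t ih =>
    rw [List.foldl_cons]
    by_cases hx : x ∈ s
    · rw [show step1 (s, d) x = (s, PySem.Set.add d x) from by
        unfold step1; rw [if_pos ((contains_iff_mem s x).mpr hx)]]
      obtain ⟨ih1, ih2⟩ := ih s (PySem.Set.add d x)
      refine ⟨?_, ?_⟩
      · rw [ih1, List.mem_cons]
        by_cases hv : v = x
        · subst hv; tauto
        · tauto
      · rw [ih2, PySem.Set.mem_add, List.mem_cons, List.count_cons]
        by_cases hv : v = x
        · subst hv
          constructor
          · intro _; exact Or.inr (Or.inl ⟨hx, Or.inl rfl⟩)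
          · intro _; exact Or.inl (Or.inr rfl)
        · have hb : ¬((x == v) = true) := by simpa using Ne.symm hv
          rw [if_neg hb, Nat.add_zero]
          tauto
    · rw [show step1 (s, d) x = (PySem.Set.add s x, d) from by
        unfold step1
        rw [if_neg (fun hc => hx ((contains_iff_mem s x).mp hc))]]
      obtain ⟨ih1, ih2⟩ := ih (PySem.Set.add s x) d
      refine ⟨?_, ?_⟩
      · rw [ih1, PySem.Set.mem_add, List.mem_cons]
        tauto
      · rw [ih2, PySem.Set.mem_add, List.mem_cons, List.count_cons]
        by_cases hv : v = x
        · subst hv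
          constructor
          · rintro (h | ⟨_, ht⟩ | h)
            · exact Or.inl h
            · refine Or.inr (Or.inr ?_)
              have hpos := List.count_pos_iff.mpr ht
              rw [if_pos (beq_self_eq_true v)]
              omega
            · refine Or.inr (Or.inr ?_)
              rw [if_pos (beq_self_eq_true v)]
              omega
          · rintro (h | ⟨hs, _⟩ | h)
            · exact Or.inl h
            · exact absurd hs hx
            · rw [if_pos (beq_self_eq_true v)] at h
              exact Or.inr (Or.inl ⟨Or.inr rfl, List.count_pos_iff.mp (by omega)⟩)
        · have hb : ¬((x == v) = true) := by simpa using Ne.symm hv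
          rw [if_neg hb, Nat.add_zero]
          tauto

-- The ordered-emit loop, as a recursion on the value list.
def emit (p : String → Bool) : List String → PySem.Set String → List String
  | [], _ => []
  | x :: t, em =>
    if p x && !(PySem.Set.contains em x) then x :: emit p t (PySem.Set.add em x)
    else emit p t em

lemma fold2_fst (dup : PySem.Set String) (vs : List String) (acc : List String)
    (em : PySem.Set String) :
    (vs.foldl (step2 dup) (acc, em)).1
      = acc ++ emit (fun v => PySem.Set.contains dup v) vs em := by
  induction vs generalizing acc em with
  | nil => simp [emit]
  | cons x t ih =>
    rw [List.foldl_cons]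
    simp only [emit]
    by_cases h : (PySem.Set.contains dup x && !(PySem.Set.contains em x)) = true
    · rw [show step2 dup (acc, em) x = (acc ++ [x], PySem.Set.add em x) from by
        unfold step2; rw [if_pos h]]
      rw [ih, if_pos h]
      simp
    · rw [show step2 dup (acc, em) x = (acc, em) from by
        unfold step2; rw [if_neg h]]
      rw [ih, if_neg h]

lemma emit_congr (p q : String → Bool) (h : ∀ v, p v = q v) (vs : List String)
    (em : PySem.Set String) : emit p vs em = emit q vs em := by
  induction vs generalizing em with
  | nil => rfl
  | cons x t ih => simp only [emit, h x]; split <;> simp [ih]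

lemma emit_filter (p : String → Bool) (vs : List String) (em : PySem.Set String) :
    emit p vs em = emit (fun _ => true) (vs.filter p) em := by
  induction vs generalizing em with
  | nil => rfl
  | cons x t ih =>
    by_cases hp : p x = true
    · simp only [emit, List.filter_cons, hp, if_pos, Bool.true_and]
      split <;> simp [ih]
    · simp only [emit, hp, Bool.false_and, Bool.false_eq_true, if_false,
        List.filter_cons]
      simp [ih]

lemma emit_all (vs : List String) (em : PySem.Set String) :
    em ++ emit (fun _ => true) vs em = vs.foldl PySem.Set.add em := by
  induction vs generalizing em with
  | nil => simp [emit]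
  | cons x t ih =>
    by_cases h : x ∈ em
    · have hc : PySem.Set.contains em x = true := (contains_iff_mem em x).mpr h
      simp only [emit, hc, Bool.not_true, Bool.and_false, Bool.false_eq_true, if_false,
        List.foldl_cons, add_eq_self h]
      exact ih em
    · have hc : PySem.Set.contains em x = false := by
        rw [Bool.eq_false_iff]
        exact fun hcc => h ((contains_iff_mem em x).mp hcc)
      simp only [emit, hc, Bool.not_false, Bool.and_true, if_pos,
        List.foldl_cons]
      rw [← ih (PySem.Set.add em x), add_eq_append h]
      simp
  
-- deduplication commutes with filtering
lemma filter_add (s : PySem.Set String) (x : String) (p : String → Bool) :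
    (PySem.Set.add s x).filter p
      = if p x then PySem.Set.add (s.filter p) x else s.filter p := by
  by_cases h : x ∈ s
  · rw [add_eq_self h]
    by_cases hp : p x = true
    · rw [if_pos hp, add_eq_self (List.mem_filter.mpr ⟨h, hp⟩)]
    · rw [if_neg hp]
  · rw [add_eq_append h, List.filter_append]
    have hnf : x ∉ s.filter p := fun hc => h (List.mem_filter.mp hc).1
    by_cases hp : p x = true
    · rw [if_pos hp, add_eq_append hnf]
      simp [hp]
    · rw [if_neg hp]
      simp [hp]

lemma ofList_filter (vs : List String) (p : String → Bool) (s : PySem.Set String) :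
    (vs.foldl PySem.Set.add s).filter p
      = (vs.filter p).foldl PySem.Set.add (s.filter p) := by
  induction vs generalizing s with
  | nil => rfl
  | cons x t ih =>
    rw [List.foldl_cons, ih, filter_add, List.filter_cons]
    by_cases hp : p x = true <;> simp [hp]

-- B's result, characterised the same way.
lemma B_characterisation (images : List (String × List String)) :
    find_common_img_alt images =
      (PySem.Set.ofList (images.flatMap (fun kv => kv.2))).filter
        (fun v => decide (2 ≤ (images.flatMap (fun kv => kv.2)).count v)) := by
  have h0 : find_common_img_alt images =
      (images.foldl (fun st kv =>
          kv.2.foldl (step2 ((images.foldl (fun sd kv => kv.2.foldl step1 sd)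
            (PySem.Set.empty, PySem.Set.empty)).2)) st)
        ([], PySem.Set.empty)).1 := rfl
  rw [h0, ← List.foldl_flatMap (f := fun kv : String × List String => kv.2),
    ← List.foldl_flatMap (f := fun kv : String × List String => kv.2)]
  set vs := images.flatMap (fun kv => kv.2) with hvs
  set dup := (vs.foldl step1 (PySem.Set.empty, PySem.Set.empty)).2 with hdup
  rw [fold2_fst, List.nil_append]
  have hdupc : ∀ v, PySem.Set.contains dup v = decide (2 ≤ vs.count v) := by
    intro v
    have hm := (pass1_invariant vs PySem.Set.empty PySem.Set.empty v).2
    rw [Bool.eq_iff_iff, contains_iff_mem, decide_eq_true_iff, hdup, hm]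
    simp [PySem.Set.empty]
  rw [emit_congr _ _ hdupc, emit_filter]
  have hall : emit (fun _ => true) (vs.filter (fun v => decide (2 ≤ vs.count v)))
      PySem.Set.empty
      = (vs.filter (fun v => decide (2 ≤ vs.count v))).foldl PySem.Set.add
          PySem.Set.empty := by
    have h := emit_all (vs.filter (fun v => decide (2 ≤ vs.count v))) PySem.Set.empty
    simpa [PySem.Set.empty] using h
  rw [hall, show (PySem.Set.ofList vs : List String)
      = vs.foldl PySem.Set.add ([] : List String) from rfl, ofList_filter]
  rfl

-- ===== VERDICT (by name: the statement is the Claim_ definition above) =====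
theorem find_common_img_spec : Claim_equal_find_common_img := by
  intro images _
  unfold Spec_find_common_img
  rw [A_characterisation, B_characterisation]
  apply List.filter_congr
  intro v _
  simp only [decide_eq_decide]
  constructor <;> intro h <;> [exact_mod_cast h; exact_mod_cast h]
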